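-- pv_equiv track=rewrite | github.com/satyamsk05/Govt | scraper/fetcher.py | is_valid_year
-- ===== SOURCE A (Python) =====
-- def is_valid_year(text, url):
--     """
--     Checks if the content is from 2025 or newer.
--     Strictly filters out anything containing 2000-2024.
--     """
--     valid_years = ["2025", "2026", "2027", "2028"]
--     invalid_years = [str(y) for y in range(2000, 2025)]
--
--     text_lower = text.lower()
--     url_lower = url.lower()
--
--     # Check for invalid years first to be strict
--     if any(yr in text_lower or yr in url_lower for yr in invalid_years):
--         return False
--
--     # Check if a valid year is present
--     if any(yr in text_lower or yr in url_lower for yr in valid_years):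
--         return True
--
--     # Special case: If no year is found but the post is very recent (no year in title)
--     # We might allow it if it's from 2026 specifically (future-proof)
--     return False
-- ===== SOURCE B (Python) =====
-- def is_valid_year(text, url):
--     """
--     Set-based re-implementation: collect every (overlapping) 4-character
--     window of text and url once, then intersect that set with precomputed
--     year sets instead of running 29 separate substring scans.
--     """
--     invalid = {str(y) for y in range(2000, 2025)}
--     valid = {"2025", "2026", "2027", "2028"}
--     windows = set()
--     for s in (text, url):
--         for i in range(len(s) - 3):
--             windows.add(s[i:i+4])
--     if windows & invalid:
--         return False
--     return bool(windows & valid)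
-- ===== Notes on version B (the rewrite author's own statement) =====
-- stated objective: alternative
-- what changed: Instead of scanning the lowercased text and url once per each of 29 year literals with substring tests, B builds the set of all overlapping 4-character windows of both inputs in one pass and intersects it with precomputed invalid/valid year sets (digit windows are unaffected by lowercasing, so the lower() normalization is dropped).
import Mathlib
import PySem

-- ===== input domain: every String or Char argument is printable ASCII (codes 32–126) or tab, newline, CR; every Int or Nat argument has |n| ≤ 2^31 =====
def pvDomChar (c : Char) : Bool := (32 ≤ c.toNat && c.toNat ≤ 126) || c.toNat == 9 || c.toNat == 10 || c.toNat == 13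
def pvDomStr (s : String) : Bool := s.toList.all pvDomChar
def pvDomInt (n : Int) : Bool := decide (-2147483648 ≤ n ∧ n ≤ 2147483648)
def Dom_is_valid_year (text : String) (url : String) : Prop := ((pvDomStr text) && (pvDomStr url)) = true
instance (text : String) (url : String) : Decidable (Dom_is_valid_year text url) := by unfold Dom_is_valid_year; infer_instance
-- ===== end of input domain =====

-- B replaces A's 29 per-literal substring scans by one pass collecting the set of all
-- overlapping 4-character windows of text and url, intersected with precomputed year sets.

-- ===== PORT A =====
def is_valid_year (text : String) (url : String) : Bool :=
  let valid_years : List String := ["2025", "2026", "2027", "2028"]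
  let invalid_years : List String := (PySem.List.pyRange 2000 2025).map PySem.Int.toStr
  let text_lower := PySem.Str.lower text
  let url_lower := PySem.Str.lower url
  if invalid_years.any (fun yr => PySem.Str.isIn yr text_lower || PySem.Str.isIn yr url_lower) then
    false
  else if valid_years.any (fun yr => PySem.Str.isIn yr text_lower || PySem.Str.isIn yr url_lower) then
    true
  else
    false

-- ===== PORT B =====
-- inner loop of Source B: 'for i in range(len(s) - 3): windows.add(s[i:i+4])'
def pvAddWindows (ws : PySem.Set String) (s : String) : PySem.Set String :=
  (PySem.List.pyRange 0 (PySem.Str.len s - 3)).foldl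
    (fun ws i => PySem.Set.add ws (PySem.Str.slice s (some i) (some (i + 4)))) ws

def is_valid_year_alt (text : String) (url : String) : Bool :=
  let invalid : PySem.Set String :=
    PySem.Set.ofList ((PySem.List.pyRange 2000 2025).map PySem.Int.toStr)
  let valid : PySem.Set String := PySem.Set.ofList ["2025", "2026", "2027", "2028"]
  let windows : PySem.Set String := [text, url].foldl pvAddWindows PySem.Set.empty
  if !(PySem.Set.inter windows invalid).isEmpty then
    false
  else
    !(PySem.Set.inter windows valid).isEmpty

-- ===== PRECONDITION & SPEC =====
def Spec_is_valid_year (text : String) (url : String) (out : Bool) : Prop := out = is_valid_year_alt text url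
instance (text : String) (url : String) (out : Bool) : Decidable (Spec_is_valid_year text url out) := by unfold Spec_is_valid_year; infer_instance

-- ===== CLAIM (what is proved, stated in full; the proofs are below) =====
def Claim_equal_is_valid_year : Prop := ∀ (text : String) (url : String), Dom_is_valid_year text url → Spec_is_valid_year text url (is_valid_year text url)

-- ===== LEMMAS AND PROOFS =====

-- all overlapping 4-character windows of a character list
def pvW4 : List Char → List (List Char)
  | a :: b :: c :: d :: t => [a, b, c, d] :: pvW4 (b :: c :: d :: t)
  | _ => []

lemma pvW4_map (f : Char → Char) (cs : List Char) :
    pvW4 (cs.map f) = (pvW4 cs).map (List.map f) := by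
  induction cs using pvW4.induct with
  | case1 a b c d t ih =>
    simp only [List.map_cons] at ih ⊢
    rw [pvW4, pvW4, ih]
    simp
  | case2 cs h =>
    match cs, h with
    | [], _ => simp [pvW4]
    | [a], _ => simp [pvW4]
    | [a, b], _ => simp [pvW4]
    | [a, b, c], _ => simp [pvW4]
    | a :: b :: c :: d :: t, h => exact absurd rfl (h a b c d t)

lemma mem_pvW4 (w cs : List Char) : w ∈ pvW4 cs ↔ w.length = 4 ∧ w <:+: cs := by
  induction cs using pvW4.induct with
  | case1 a b c d t ih =>
    constructor
    · intro hm
      rcases List.mem_cons.mp hm with h | h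
      · subst h; exact ⟨rfl, ⟨[], t, rfl⟩⟩
      · obtain ⟨h4, hinf⟩ := ih.mp h
        exact ⟨h4, hinf.trans (List.infix_cons (List.infix_refl _))⟩
    · rintro ⟨h4, hinf⟩
      rcases List.infix_cons_iff.mp hinf with hp | hi
      · refine List.mem_cons.mpr (Or.inl ?_)
        have hw := List.prefix_iff_eq_take.mp hp
        rw [h4] at hw
        simpa using hw
      · exact List.mem_cons.mpr (Or.inr (ih.mpr ⟨h4, hi⟩))
  | case2 cs h =>
    have hlen : cs.length ≤ 3 := by
      match cs, h with
      | [], _ => simp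
      | [a], _ => simp
      | [a, b], _ => simp
      | [a, b, c], _ => simp
      | a :: b :: c :: d :: t, h => exact absurd rfl (h a b c d t)
    have hnil : pvW4 cs = [] := by
      match cs, h with
      | [], _ => rfl
      | [a], _ => rfl
      | [a, b], _ => rfl
      | [a, b, c], _ => rfl
      | a :: b :: c :: d :: t, h => exact absurd rfl (h a b c d t)
    rw [hnil]
    simp only [List.not_mem_nil, false_iff]
    rintro ⟨h4, hinf⟩
    have := hinf.length_le
    omega

lemma pvW4_eq_range (cs : List Char) :
    pvW4 cs = (List.range (cs.length - 3)).map (fun i => (cs.drop i).take 4) := by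
  induction cs using pvW4.induct with
  | case1 a b c d t ih =>
    have : (a :: b :: c :: d :: t).length - 3 = (b :: c :: d :: t).length - 3 + 1 := by
      simp
    rw [pvW4, ih, this, List.range_succ_eq_map]
    simp [Function.comp]
  | case2 cs h =>
    have hnil : pvW4 cs = [] ∧ cs.length ≤ 3 := by
      match cs, h with
      | [], _ => exact ⟨rfl, by simp⟩
      | [a], _ => exact ⟨rfl, by simp⟩
      | [a, b], _ => exact ⟨rfl, by simp⟩
      | [a, b, c], _ => exact ⟨rfl, by simp⟩
      | a :: b :: c :: d :: t, h => exact absurd rfl (h a b c d t)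
    rw [hnil.1]
    have : cs.length - 3 = 0 := by omega
    rw [this]
    simp

lemma pvChar_le_iff (a b : Char) : a ≤ b ↔ a.toNat ≤ b.toNat := by
  constructor
  · intro h; exact Nat.le_of_lt_succ (Nat.lt_succ_of_le (UInt32.le_iff_toNat_le.mp h))
  · intro h; exact UInt32.le_iff_toNat_le.mpr h

lemma pvLowerChar_eq_digit {c d : Char} (hd : PySem.Chars.isdigit d = true) :
    PySem.Chars.lowerChar c = d ↔ c = d := by
  have hdn : 48 ≤ d.toNat ∧ d.toNat ≤ 57 := by
    simp only [PySem.Chars.isdigit, Bool.and_eq_true, decide_eq_true_eq] at hd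
    have h1 := (pvChar_le_iff _ _).mp hd.1
    have h2 := (pvChar_le_iff _ _).mp hd.2
    have e0 : ('0' : Char).toNat = 48 := rfl
    have e9 : ('9' : Char).toNat = 57 := rfl
    rw [e0] at h1; rw [e9] at h2
    exact ⟨h1, h2⟩
  constructor
  · intro h
    by_cases hu : PySem.Chars.isupper c = true
    · exfalso
      have hcn : 65 ≤ c.toNat ∧ c.toNat ≤ 90 := by
        simp only [PySem.Chars.isupper, Bool.and_eq_true, decide_eq_true_eq] at hu
        have h1 := (pvChar_le_iff _ _).mp hu.1
        have h2 := (pvChar_le_iff _ _).mp hu.2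
        have eA : ('A' : Char).toNat = 65 := rfl
        have eZ : ('Z' : Char).toNat = 90 := rfl
        rw [eA] at h1; rw [eZ] at h2
        exact ⟨h1, h2⟩
      have hval : (c.toNat + 32).isValidChar := by
        left; omega
      have : (PySem.Chars.lowerChar c).toNat = c.toNat + 32 := by
        simp [PySem.Chars.lowerChar, hu, Char.toNat_ofNat, hval]
      rw [h] at this
      omega
    · simpa [PySem.Chars.lowerChar, hu] using h
  · intro h
    subst h
    have hu : PySem.Chars.isupper c = false := by
      simp only [PySem.Chars.isupper, Bool.and_eq_false_iff]
      by_cases h1 : 65 ≤ c.toNat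
      · right; simp only [decide_eq_false_iff_not]
        intro hle
        have h2 := (pvChar_le_iff _ _).mp hle
        have eZ : ('Z' : Char).toNat = 90 := rfl
        rw [eZ] at h2
        omega
      · left; simp only [decide_eq_false_iff_not]
        intro hle
        have h1 := (pvChar_le_iff _ _).mp hle
        have eA : ('A' : Char).toNat = 65 := rfl
        rw [eA] at h1
        omega
    simp [PySem.Chars.lowerChar, hu]

lemma pvMap_lower_digits {w ys : List Char} (hy : ys.all PySem.Chars.isdigit = true) :
    w.map PySem.Chars.lowerChar = ys ↔ w = ys := by
  induction w generalizing ys with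
  | nil => cases ys <;> simp
  | cons a w ih =>
    cases ys with
    | nil => simp
    | cons b ys =>
      simp only [List.all_cons, Bool.and_eq_true] at hy
      simp only [List.map_cons, List.cons.injEq]
      rw [pvLowerChar_eq_digit hy.1, ih hy.2]

lemma pvInfix_lower {ys cs : List Char} (h4 : ys.length = 4)
    (hd : ys.all PySem.Chars.isdigit = true) :
    ys <:+: PySem.Chars.lower cs ↔ ys <:+: cs := by
  have hmap : PySem.Chars.lower cs = cs.map PySem.Chars.lowerChar := rfl
  constructor
  · intro h
    have hm : ys ∈ pvW4 (cs.map PySem.Chars.lowerChar) := by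
      rw [mem_pvW4]; exact ⟨h4, hmap ▸ h⟩
    rw [pvW4_map] at hm
    obtain ⟨w, hw, hwe⟩ := List.mem_map.mp hm
    have : w = ys := (pvMap_lower_digits hd).mp hwe
    subst this
    exact ((mem_pvW4 w cs).mp hw).2
  · intro h
    have hm : ys ∈ pvW4 cs := (mem_pvW4 ys cs).mpr ⟨h4, h⟩
    have : ys.map PySem.Chars.lowerChar ∈ (pvW4 cs).map (List.map PySem.Chars.lowerChar) :=
      List.mem_map.mpr ⟨ys, hm, rfl⟩
    rw [← pvW4_map] at this
    rw [(pvMap_lower_digits hd).mpr rfl] at this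
    rw [hmap]
    exact ((mem_pvW4 ys _).mp this).2

lemma pvMem_foldl_add (g : Int → String) (l : List Int) (ws : PySem.Set String) (x : String) :
    x ∈ l.foldl (fun a i => PySem.Set.add a (g i)) ws ↔ x ∈ ws ∨ x ∈ l.map g := by
  induction l generalizing ws with
  | nil => simp
  | cons i l ih =>
    simp only [List.foldl_cons, List.map_cons, List.mem_cons]
    rw [ih, PySem.Set.mem_add]
    tauto

lemma pvMem_addWindows (x : String) (ws : PySem.Set String) (s : String) :
    x ∈ pvAddWindows ws s ↔ x ∈ ws ∨ x.toList ∈ pvW4 s.toList := by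
  unfold pvAddWindows
  rw [pvMem_foldl_add]
  have hlen : PySem.Str.len s = (s.toList.length : Int) := PySem.Str.len_eq s
  by_cases h3 : 3 ≤ s.toList.length
  · have : PySem.Str.len s - 3 = ((s.toList.length - 3 : Nat) : Int) := by
      rw [hlen]; omega
    rw [this, PySem.List.pyRange_zero_natCast, List.map_map]
    have hwin : ∀ i : Nat, (PySem.Str.slice s (some (i : Int)) (some ((i : Int) + 4))).toList
        = (s.toList.drop i).take 4 := by
      intro i
      rw [PySem.Str.toList_slice]
      have : ((i : Int) + 4) = ((i : Int) + ((4 : Nat) : Int)) := by norm_num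
      rw [this]
      exact PySem.List.slice_natCast_add s.toList i 4
    constructor
    · rintro (h | h)
      · exact Or.inl h
      · obtain ⟨k, hk, he⟩ := List.mem_map.mp h
        refine Or.inr ?_
        rw [pvW4_eq_range]
        refine List.mem_map.mpr ⟨k, hk, ?_⟩
        rw [← he]
        simp only [Function.comp]
        exact (hwin k).symm
    · rintro (h | h)
      · exact Or.inl h
      · rw [pvW4_eq_range] at h
        obtain ⟨k, hk, he⟩ := List.mem_map.mp h
        refine Or.inr (List.mem_map.mpr ⟨k, hk, ?_⟩)
        simp only [Function.comp]
        apply String.toList_inj.mp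
        rw [hwin k, he]
  · have hneg : PySem.Str.len s - 3 ≤ 0 := by rw [hlen]; omega
    have hr : PySem.List.pyRange 0 (PySem.Str.len s - 3) = [] := by
      apply List.eq_nil_iff_forall_not_mem.mpr
      intro x hx
      have := PySem.List.mem_pyRange_one.mp hx
      omega
    have hw : pvW4 s.toList = [] := by
      rw [pvW4_eq_range]
      have : s.toList.length - 3 = 0 := by omega
      rw [this]; simp
    rw [hr, hw]; simp

lemma pvDigits29 : ∀ yr ∈ ((PySem.List.pyRange 2000 2025).map PySem.Int.toStr)
    ++ ["2025", "2026", "2027", "2028"],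
    yr.toList.length = 4 ∧ yr.toList.all PySem.Chars.isdigit = true := by decide

-- A's per-literal test equals membership of the literal in B's window set
lemma pvKey (yr text url : String) (h4 : yr.toList.length = 4)
    (hd : yr.toList.all PySem.Chars.isdigit = true) :
    (PySem.Str.isIn yr (PySem.Str.lower text) || PySem.Str.isIn yr (PySem.Str.lower url)) = true
      ↔ yr ∈ [text, url].foldl pvAddWindows PySem.Set.empty := by
  have hside : ∀ s : String, PySem.Str.isIn yr (PySem.Str.lower s) = true ↔ yr.toList ∈ pvW4 s.toList := by
    intro s
    rw [PySem.Str.isIn_iff_infix, PySem.Str.toList_lower, pvInfix_lower h4 hd, mem_pvW4]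
    tauto
  simp only [List.foldl_cons, List.foldl_nil]
  rw [pvMem_addWindows, pvMem_addWindows, Bool.or_eq_true, hside text, hside url]
  simp [PySem.Set.empty]

lemma pvInter_nonempty (ws : PySem.Set String) (l : List String) :
    (!(PySem.Set.inter ws (PySem.Set.ofList l)).isEmpty) = true
      ↔ ∃ yr ∈ l, yr ∈ ws := by
  rw [Bool.not_eq_eq_eq_not, Bool.not_true, List.isEmpty_eq_false_iff_exists_mem]
  constructor
  · rintro ⟨x, hx⟩
    have := (PySem.Set.mem_inter ws (PySem.Set.ofList l) x).mp hx
    exact ⟨x, (PySem.Set.mem_ofList l x).mp this.2, this.1⟩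
  · rintro ⟨yr, hl, hw⟩
    exact ⟨yr, (PySem.Set.mem_inter ws (PySem.Set.ofList l) yr).mpr
      ⟨hw, (PySem.Set.mem_ofList l yr).mpr hl⟩⟩

lemma pvCond_eq (l : List String) (text url : String)
    (hdig : ∀ yr ∈ l, yr.toList.length = 4 ∧ yr.toList.all PySem.Chars.isdigit = true) :
    (l.any (fun yr => PySem.Str.isIn yr (PySem.Str.lower text) || PySem.Str.isIn yr (PySem.Str.lower url)))
      = !(PySem.Set.inter ([text, url].foldl pvAddWindows PySem.Set.empty) (PySem.Set.ofList l)).isEmpty := by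
  rw [Bool.eq_iff_iff, List.any_eq_true, pvInter_nonempty]
  constructor
  · rintro ⟨yr, hl, hyr⟩
    exact ⟨yr, hl, (pvKey yr text url (hdig yr hl).1 (hdig yr hl).2).mp hyr⟩
  · rintro ⟨yr, hl, hyr⟩
    exact ⟨yr, hl, (pvKey yr text url (hdig yr hl).1 (hdig yr hl).2).mpr hyr⟩

lemma pvIte_collapse (c1 c2 : Bool) :
    (if c1 then false else if c2 then true else false) = (if c1 then false else c2) := by
  cases c1 <;> cases c2 <;> rfl

-- ===== VERDICT (by name: the statement is the Claim_ definition above) =====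
theorem is_valid_year_spec : Claim_equal_is_valid_year := by
  intro text url _
  unfold Spec_is_valid_year is_valid_year is_valid_year_alt
  have hinv : ∀ yr ∈ (PySem.List.pyRange 2000 2025).map PySem.Int.toStr,
      yr.toList.length = 4 ∧ yr.toList.all PySem.Chars.isdigit = true := by
    intro yr h; exact pvDigits29 yr (List.mem_append.mpr (Or.inl h))
  have hval : ∀ yr ∈ ["2025", "2026", "2027", "2028"],
      yr.toList.length = 4 ∧ yr.toList.all PySem.Chars.isdigit = true := by
    intro yr h; exact pvDigits29 yr (List.mem_append.mpr (Or.inr h))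
  have e1 := pvCond_eq ((PySem.List.pyRange 2000 2025).map PySem.Int.toStr) text url hinv
  have e2 := pvCond_eq ["2025", "2026", "2027", "2028"] text url hval
  simp only [e1, e2]
  exact pvIte_collapse _ _
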